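-- pv_equiv track=rewrite | github.com/fengmudong/torsiondrive | torsiondrive/tools/plot_2d_contour.py | find_grid_spacing
-- ===== SOURCE A (Python) =====
-- def find_grid_spacing(grid_id_list):
--     """ Find the largest possible grid spacing for one dimension grid id list """
--     if not grid_id_list: return None
--     assert all(-180 < grid_id <= 180 for grid_id in grid_id_list), f"grid id out of range (-180, 180]: {grid_id_list}"
--     if len(grid_id_list) == 1:
--         # find the largest possible grid spacing if only one data is available this direction
--         # The answer is the largest divisor of
--         # a: grid range 360
--         # b: distance from grid_id to -180
--         grid_id = grid_id_list[0]
--         res = largest_common_divisor(360, grid_id+180)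
--     else:
--         n = len(grid_id_list)
--         grid_id_list = sorted(grid_id_list)
--         res = 360
--         for i in range(n):
--             gid = grid_id_list[i]
--             spacing = largest_common_divisor(360, gid+180)
--             res = largest_common_divisor(res, spacing)
--             if i < n-1:
--                 step = grid_id_list[i+1] - gid
--                 res = largest_common_divisor(res, step)
--     return res
--
-- def largest_common_divisor(a, b):
--     """ Get the largest common divisor of a and b """
--     while b:
--         a, b = b, a%b
--     return a
-- ===== SOURCE B (Python) =====
-- def largest_common_divisor(a, b):
--     """ Get the largest common divisor of a and b """
--     while b:
--         a, b = b, a%b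
--     return a
--
-- def find_grid_spacing(grid_id_list):
--     """ Find the largest possible grid spacing for one dimension grid id list """
--     if not grid_id_list: return None
--     assert all(-180 < grid_id <= 180 for grid_id in grid_id_list), f"grid id out of range (-180, 180]: {grid_id_list}"
--     res = 360
--     for gid in grid_id_list:
--         res = largest_common_divisor(res, gid + 180)
--     return res
-- ===== Notes on version B (the rewrite author's own statement) =====
-- stated objective: simpler
-- what changed: Replaces A's sort, len==1 special case and consecutive-step gcd accumulation by one flat pass res = gcd(res, gid+180) starting from 360: each step is a difference of two (gid+180) values, so the steps and the sort are redundant for the gcd.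
import Mathlib
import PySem

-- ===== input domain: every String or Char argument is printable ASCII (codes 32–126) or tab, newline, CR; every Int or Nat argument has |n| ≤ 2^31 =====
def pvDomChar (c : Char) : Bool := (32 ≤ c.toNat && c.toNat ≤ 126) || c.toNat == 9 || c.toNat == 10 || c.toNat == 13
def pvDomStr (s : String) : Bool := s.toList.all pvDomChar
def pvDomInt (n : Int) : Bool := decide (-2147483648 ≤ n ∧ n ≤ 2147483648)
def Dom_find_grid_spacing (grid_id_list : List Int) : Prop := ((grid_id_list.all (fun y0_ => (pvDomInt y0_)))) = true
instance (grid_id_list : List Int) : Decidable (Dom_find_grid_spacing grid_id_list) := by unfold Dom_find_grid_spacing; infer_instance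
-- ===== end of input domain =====

-- B replaces A's sort, len==1 special case and consecutive-step gcd accumulation by one flat
-- gcd pass over gid+180 (simpler; the steps are differences of the gid+180 values, so they
-- are redundant for the gcd).


-- ===== PORT A =====
-- shared helper: both Pythons define the identical largest_common_divisor (Euclid with Python %)
def largest_common_divisor (a b : Int) : Int :=
  if h : b = 0 then a
  else largest_common_divisor b (PySem.Int.mod a b)
termination_by b.natAbs
decreasing_by
  rcases lt_trichotomy b 0 with hb | hb | hb
  · have := PySem.Int.mod_neg_bounds a hb; omega
  · exact absurd hb h
  · have h1 := PySem.Int.mod_nonneg a hb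
    have h2 := PySem.Int.mod_lt a hb
    omega

-- A's for-i-in-range(n) loop over the sorted list: at index i gcd in the spacing of s[i],
-- and, when i < n-1, also the step s[i+1] - s[i]; transcribed structurally on the list.
def gsLoopA (res : Int) : List Int → Int
  | [] => res
  | [g] => largest_common_divisor res (largest_common_divisor 360 (g + 180))
  | g1 :: g2 :: t =>
      gsLoopA (largest_common_divisor
                 (largest_common_divisor res (largest_common_divisor 360 (g1 + 180)))
                 (g2 - g1)) (g2 :: t)

def find_grid_spacing (grid_id_list : List Int) : Option Int :=
  if grid_id_list = [] then none
  else if grid_id_list.length = 1 then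
    some (largest_common_divisor 360 (PySem.List.pyGetD grid_id_list 0 0 + 180))
  else
    some (gsLoopA 360 (PySem.List.sorted grid_id_list (fun x => x) false))

-- ===== PORT B =====
def find_grid_spacing_alt (grid_id_list : List Int) : Option Int :=
  if grid_id_list = [] then none
  else
    some (grid_id_list.foldl (fun res gid => largest_common_divisor res (gid + 180)) 360)

-- ===== PRECONDITION & SPEC =====
-- Pre_ excludes lists containing a grid id outside (-180, 180], on which A's assert raises
-- AssertionError (B raises too); the empty list (A returns None) stays inside.
def Pre_find_grid_spacing (grid_id_list : List Int) : Prop :=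
  ∀ g ∈ grid_id_list, -180 < g ∧ g ≤ 180
instance (grid_id_list : List Int) : Decidable (Pre_find_grid_spacing grid_id_list) := by
  unfold Pre_find_grid_spacing; infer_instance
def pvWitness_find_grid_spacing : List Int := [-90, 30, 30, 180]

def Spec_find_grid_spacing (grid_id_list : List Int) (out : Option Int) : Prop := out = find_grid_spacing_alt grid_id_list
instance (grid_id_list : List Int) (out : Option Int) : Decidable (Spec_find_grid_spacing grid_id_list out) := by unfold Spec_find_grid_spacing; infer_instance

-- ===== CLAIM (what is proved, stated in full; the proofs are below) =====
def Claim_equal_find_grid_spacing : Prop := ∀ (grid_id_list : List Int), Dom_find_grid_spacing grid_id_list → Pre_find_grid_spacing grid_id_list → Spec_find_grid_spacing grid_id_list (find_grid_spacing grid_id_list)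

-- ===== LEMMAS AND PROOFS =====

-- Nat-level view of one gcd-accumulation pass (what both programs compute)
def gfold (m : Nat) (l : List Int) : Nat :=
  l.foldl (fun r g => Nat.gcd r (g + 180).toNat) m

-- Euclid with Python % on Nat casts is Nat.gcd
theorem lcd_natCast (n m : Nat) :
    largest_common_divisor (m : Int) (n : Int) = ((Nat.gcd m n : Nat) : Int) := by
  induction n using Nat.strong_induction_on generalizing m with
  | _ n ih =>
    rcases Nat.eq_zero_or_pos n with h0 | hpos
    · subst h0; rw [largest_common_divisor]; simp
    · rw [largest_common_divisor]
      have hne : (n : Int) ≠ 0 := by exact_mod_cast Nat.pos_iff_ne_zero.mp hpos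
      rw [dif_neg hne, PySem.Int.mod_natCast, ih (m % n) (Nat.mod_lt _ hpos)]
      rw [Nat.gcd_comm n (m % n), ← Nat.gcd_rec n m, Nat.gcd_comm n m]

theorem lcd_of_nonneg {a b : Int} (ha : 0 ≤ a) (hb : 0 ≤ b) :
    largest_common_divisor a b = ((Nat.gcd a.toNat b.toNat : Nat) : Int) := by
  have := lcd_natCast b.toNat a.toNat
  rwa [Int.toNat_of_nonneg ha, Int.toNat_of_nonneg hb] at this

-- B's fold is gfold
theorem foldB_eq (l : List Int) (m : Nat) (hl : ∀ g ∈ l, -180 < g) :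
    l.foldl (fun res gid => largest_common_divisor res (gid + 180)) (m : Int)
      = ((gfold m l : Nat) : Int) := by
  induction l generalizing m with
  | nil => rfl
  | cons g t ih =>
    have hg : (0:Int) ≤ g + 180 := by have := hl g (by simp); omega
    simp only [List.foldl_cons, gfold, lcd_of_nonneg (by positivity : (0:Int) ≤ (m:Int)) hg]
    have := ih (Nat.gcd m (g + 180).toNat) (fun x hx => hl x (by simp [hx]))
    simpa [gfold] using this

-- Nat version of A's loop
def gnatA (m : Nat) : List Int → Nat
  | [] => m
  | [g] => Nat.gcd m (Nat.gcd 360 (g + 180).toNat)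
  | g1 :: g2 :: t =>
      gnatA (Nat.gcd (Nat.gcd m (Nat.gcd 360 (g1 + 180).toNat)) (g2 - g1).toNat) (g2 :: t)

theorem gsLoopA_cast (s : List Int) (m : Nat)
    (hs : List.Pairwise (fun a b => a ≤ b) s) (hr : ∀ g ∈ s, -180 < g) :
    gsLoopA (m : Int) s = ((gnatA m s : Nat) : Int) := by
  induction s generalizing m with
  | nil => rfl
  | cons g1 t ih =>
    match t with
    | [] =>
      have hg : (0:Int) ≤ g1 + 180 := by have := hr g1 (by simp); omega
      simp only [gsLoopA, gnatA,
        lcd_of_nonneg (by norm_num : (0:Int) ≤ 360) hg]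
      rw [lcd_of_nonneg (by positivity : (0:Int) ≤ (m:Int)) (by positivity)]
      simp
    | g2 :: t' =>
      have hg1 : (0:Int) ≤ g1 + 180 := by have := hr g1 (by simp); omega
      have h12 : g1 ≤ g2 := List.rel_of_pairwise_cons hs (by simp)
      have hd : (0:Int) ≤ g2 - g1 := by omega
      simp only [gsLoopA, gnatA]
      rw [lcd_of_nonneg (by norm_num : (0:Int) ≤ 360) hg1,
          lcd_of_nonneg (by positivity : (0:Int) ≤ (m:Int)) (by positivity),
          lcd_of_nonneg (by positivity) hd]
      rw [ih _ (hs.sublist (by simp)) (fun x hx => hr x (by simp [hx]))]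
      congr 2

-- the steps and the 360-re-gcd are redundant: gnatA is gfold, for an accumulator dividing 360
theorem gnatA_eq_gfold (s : List Int) (m : Nat) (hm : m ∣ 360)
    (hs : List.Pairwise (fun a b => a ≤ b) s) (hr : ∀ g ∈ s, -180 < g) :
    gnatA m s = gfold m s := by
  induction s generalizing m with
  | nil => rfl
  | cons g1 t ih =>
    have hg1 : (0:Int) ≤ g1 + 180 := by have := hr g1 (by simp); omega
    match t with
    | [] =>
      simp only [gnatA, gfold, List.foldl_cons, List.foldl_nil]
      rw [← Nat.gcd_assoc, Nat.gcd_eq_left hm]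
    | g2 :: t' =>
      have h12 : g1 ≤ g2 := List.rel_of_pairwise_cons hs (by simp)
      have hm1 : Nat.gcd m (Nat.gcd 360 (g1 + 180).toNat) = Nat.gcd m (g1 + 180).toNat := by
        rw [← Nat.gcd_assoc, Nat.gcd_eq_left hm]
      simp only [gnatA]
      rw [hm1, ih _ (dvd_trans (Nat.gcd_dvd_left _ _) (dvd_trans (Nat.gcd_dvd_left _ _) hm))
            (hs.sublist (by simp)) (fun x hx => hr x (by simp [hx]))]
      have hdvd : Nat.gcd (Nat.gcd m (g1 + 180).toNat) (g2 + 180).toNat ∣ (g2 - g1).toNat := by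
        have hx : (g2 - g1).toNat = (g2 + 180).toNat - (g1 + 180).toNat := by
          have := hr g1 (by simp); omega
        rw [hx]
        exact Nat.dvd_sub (Nat.gcd_dvd_right _ _)
          (dvd_trans (Nat.gcd_dvd_left _ _) (Nat.gcd_dvd_right _ _))
      have habs : Nat.gcd (Nat.gcd (Nat.gcd m (g1 + 180).toNat) (g2 - g1).toNat) (g2 + 180).toNat
          = Nat.gcd (Nat.gcd m (g1 + 180).toNat) (g2 + 180).toNat := by
        rw [Nat.gcd_assoc, Nat.gcd_comm (g2 - g1).toNat, ← Nat.gcd_assoc, Nat.gcd_eq_left hdvd]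
      simp only [gfold, List.foldl_cons, habs]

-- gfold is invariant under permutation (gcd is right-commutative)
theorem gfold_perm {l₁ l₂ : List Int} (h : l₁.Perm l₂) (m : Nat) : gfold m l₁ = gfold m l₂ := by
  unfold gfold
  exact @List.Perm.foldl_eq _ _ _ _ _
    ⟨fun r a b => by
      simp only [Nat.gcd_assoc, Nat.gcd_comm (a + 180).toNat (b + 180).toNat]⟩ h m

-- ===== VERDICT (by name: the statement is the Claim_ definition above) =====
theorem find_grid_spacing_spec : Claim_equal_find_grid_spacing := by
  intro l _hdom hpre
  unfold Spec_find_grid_spacing find_grid_spacing find_grid_spacing_alt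
  by_cases hnil : l = []
  · simp [hnil]
  · rw [if_neg hnil, if_neg hnil]
    have hrange : ∀ g ∈ l, -180 < g := fun g hg => (hpre g hg).1
    have hB := foldB_eq l 360 hrange
    by_cases hlen : l.length = 1
    · rw [if_pos hlen]
      match l, hlen with
      | [g], _ =>
        norm_num [PySem.List.pyGetD, PySem.List.pyGet?, PySem.List.pyIdx?, List.foldl]
    · rw [if_neg hlen]
      set s := PySem.List.sorted l (fun x => x) false with hsdef
      have hperm : s.Perm l := PySem.List.sorted_perm l (fun x => x) false
      have hpair : List.Pairwise (fun a b => a ≤ b) s := by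
        simpa using PySem.List.sorted_pairwise l (fun x => x)
      have hmem : ∀ g ∈ s, -180 < g := fun g hg => hrange g (hperm.mem_iff.mp hg)
      rw [show (360 : Int) = ((360 : Nat) : Int) by norm_num,
          gsLoopA_cast s 360 hpair hmem,
          gnatA_eq_gfold s 360 dvd_rfl hpair hmem,
          gfold_perm hperm 360, foldB_eq l 360 hrange]
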